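-- pv_equiv track=rewrite | github.com/leconize/Eye-Tracking-for-Everyone | custom_util.py | generate_valid_set
-- ===== SOURCE A (Python) =====
-- def generate_valid_set(json_files):
--     l = []
--     for json_file in json_files:
--         valid_set = set()
--         for index, value in enumerate(json_file["isValid"]):
--             if value == 1:
--                 valid_set.add(index)
--         l.append(valid_set)
--     temp = l[0]
--     for i in range(len(l)-1):
--         temp = set.intersection(temp, l[i+1])
--     return temp
-- ===== SOURCE B (Python) =====
-- def generate_valid_set(json_files):
--     n = len(json_files)
--     counts = {}
--     for json_file in json_files:
--         for index, value in enumerate(json_file["isValid"]):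
--             if value == 1:
--                 counts[index] = counts.get(index, 0) + 1
--     return {index for index, c in counts.items() if c == n}
-- ===== Notes on version B (the rewrite author's own statement) =====
-- stated objective: alternative
-- what changed: Replaces the build-all-sets-then-pairwise-intersect structure by a single pass maintaining one index->count dict, returning the indices whose count equals the number of files.
import Mathlib
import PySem

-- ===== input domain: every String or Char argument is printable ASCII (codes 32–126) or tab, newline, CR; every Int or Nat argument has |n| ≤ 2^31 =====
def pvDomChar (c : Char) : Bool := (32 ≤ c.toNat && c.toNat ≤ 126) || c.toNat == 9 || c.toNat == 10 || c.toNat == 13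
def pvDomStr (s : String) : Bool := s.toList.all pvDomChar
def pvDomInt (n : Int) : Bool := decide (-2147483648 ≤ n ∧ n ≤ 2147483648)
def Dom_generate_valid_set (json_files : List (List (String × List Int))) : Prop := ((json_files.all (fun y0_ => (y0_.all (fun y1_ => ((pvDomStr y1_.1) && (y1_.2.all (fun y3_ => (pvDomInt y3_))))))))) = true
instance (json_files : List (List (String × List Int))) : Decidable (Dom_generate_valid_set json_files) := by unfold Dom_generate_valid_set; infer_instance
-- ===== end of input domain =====

-- B replaces build-all-sets-then-pairwise-intersect by one pass over all files
-- maintaining an index -> count dict, keeping indices counted in every file (objective: alternative).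

-- ===== PORT A =====
def generate_valid_set (json_files : List (List (String × List Int))) : List Int :=
  let l : List (List Int) := json_files.foldl (fun l json_file =>
    let valid_set : PySem.Set Int :=
      (PySem.List.enumerate ((PySem.Dict.mk json_file).getD "isValid" []) 0).foldl
        (fun valid_set p => if p.2 == 1 then PySem.Set.add valid_set p.1 else valid_set)
        PySem.Set.empty
    l ++ [valid_set]) []
  -- l[0]: IndexError on empty json_files, excluded by Pre_ (total form headD)
  let temp : PySem.Set Int := l.headD []
  (PySem.List.pyRange 0 ((l.length : Int) - 1) 1).foldl
    (fun temp i => PySem.Set.inter temp (PySem.List.pyGetD l (i + 1) []))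
    temp

-- ===== PORT B =====
def generate_valid_set_alt (json_files : List (List (String × List Int))) : List Int :=
  let n : Int := (json_files.length : Int)
  let counts : PySem.Dict Int Int := json_files.foldl (fun counts json_file =>
    (PySem.List.enumerate ((PySem.Dict.mk json_file).getD "isValid" []) 0).foldl
      (fun counts p => if p.2 == 1 then counts.modify p.1 0 (· + 1) else counts)
      counts) PySem.Dict.empty
  PySem.Set.ofList ((counts.items.filter (fun q => q.2 == n)).map (·.1))

-- ===== PRECONDITION & SPEC =====
-- Pre_ excludes exactly the inputs where A raises: empty json_files (IndexError on l[0])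
-- and a file without an "isValid" key (KeyError).
def Pre_generate_valid_set (json_files : List (List (String × List Int))) : Prop :=
  json_files ≠ [] ∧ (json_files.all (fun jf => (PySem.Dict.mk jf).contains "isValid")) = true
instance (json_files : List (List (String × List Int))) : Decidable (Pre_generate_valid_set json_files) := by
  unfold Pre_generate_valid_set; infer_instance

def pvWitness_generate_valid_set : (List (List (String × List Int))) :=
  [[("isValid", [1, 0, 1])], [("isValid", [1, 1])]]

def Spec_generate_valid_set (json_files : List (List (String × List Int))) (out : List Int) : Prop := out = generate_valid_set_alt json_files
instance (json_files : List (List (String × List Int))) (out : List Int) : Decidable (Spec_generate_valid_set json_files out) := by unfold Spec_generate_valid_set; infer_instance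

-- ===== CLAIM (what is proved, stated in full; the proofs are below) =====
def Claim_equal_generate_valid_set : Prop := ∀ (json_files : List (List (String × List Int))), Dom_generate_valid_set json_files → Pre_generate_valid_set json_files → Spec_generate_valid_set json_files (generate_valid_set json_files)

-- ===== LEMMAS AND PROOFS =====

-- the list of valid indices of one file, in increasing order
def pvVl (jf : List (String × List Int)) : List Int :=
  (((PySem.List.enumerate ((PySem.Dict.mk jf).getD "isValid" []) 0)).filter (fun p => p.2 == 1)).map (·.1)

lemma pvVl_nodup (jf : List (String × List Int)) : (pvVl jf).Nodup := by
  have h := PySem.List.pairwise_lt_enumerate ((PySem.Dict.mk jf).getD "isValid" []) 0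
  have h2 := (h.filter (fun p => p.2 == 1)).map (fun p : Int × Int => p.1) (fun a b hab => hab)
  exact h2.imp (fun {a b} (hlt : a < b) => ne_of_lt hlt)

lemma pvFoldlMapFst {β : Type} (g : β → Int → β) (l : List (Int × Int)) (init : β) :
    l.foldl (fun acc p => g acc p.1) init = (l.map (·.1)).foldl g init := by
  induction l generalizing init with
  | nil => rfl
  | cons a l ih => simp only [List.foldl_cons, List.map_cons, ih]

-- A's inner loop builds exactly pvVl jf
lemma pvValidSet_eq (jf : List (String × List Int)) :
    (PySem.List.enumerate ((PySem.Dict.mk jf).getD "isValid" []) 0).foldl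
      (fun valid_set p => if p.2 == 1 then PySem.Set.add valid_set p.1 else valid_set)
      PySem.Set.empty = pvVl jf := by
  rw [PySem.List.foldl_if_eq_foldl_filter (fun p : Int × Int => p.2 == 1)
        (fun s p => PySem.Set.add s p.1)]
  rw [pvFoldlMapFst PySem.Set.add]
  rw [show PySem.Set.empty = ([] : PySem.Set Int) from rfl, ← PySem.Set.ofList_eq_foldl]
  exact PySem.Set.ofList_eq_self_of_nodup _ (pvVl_nodup jf)

lemma pvGetD_cons_succ (a : List Int) (xs : List (List Int)) (i : Int) (hi : 0 ≤ i) :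
    PySem.List.pyGetD (a :: xs) (i + 1) [] = PySem.List.pyGetD xs i [] := by
  obtain ⟨k, rfl⟩ := Int.eq_ofNat_of_zero_le hi
  have : ((k : Int) + 1) = ((k + 1 : Nat) : Int) := by push_cast; ring
  rw [this, PySem.List.pyGetD_natCast, PySem.List.pyGetD_natCast]
  rfl

-- A's final loop is a left fold of intersection over the tail
lemma pvLoopA (s : List Int) (xs : List (List Int)) :
    (PySem.List.pyRange 0 (((s :: xs).length : Int) - 1) 1).foldl
      (fun temp i => PySem.Set.inter temp (PySem.List.pyGetD (s :: xs) (i + 1) []))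
      s = xs.foldl PySem.Set.inter s := by
  have hlen : (((s :: xs).length : Int) - 1) = (xs.length : Int) := by
    simp [List.length_cons]
  rw [hlen]
  rw [PySem.List.foldl_congr_mem _ _
      (fun temp i => PySem.Set.inter temp (PySem.List.pyGetD xs i [])) s
      (fun acc x hx => by
        rw [pvGetD_cons_succ s xs x (PySem.List.mem_pyRange_one.mp hx).1])]
  exact PySem.List.foldl_pyRange_zero_pyGetD' xs [] (fun t u => PySem.Set.inter t u) s

-- folding intersection = filtering by membership in every set
lemma pvFoldInter (ts : List (List Int)) (s : List Int) :
    ts.foldl PySem.Set.inter s = s.filter (fun x => ts.all (fun t => t.contains x)) := by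
  induction ts generalizing s with
  | nil => simp
  | cons t ts ih =>
    rw [List.foldl_cons, ih]
    show (List.filter (fun x => t.contains x) s).filter _ = _
    rw [List.filter_filter]
    exact List.filter_congr (fun x _ => by simp [List.all_cons, Bool.and_comm])

-- B's dict is the counter of the concatenation of all files' valid-index lists
lemma pvCounts_eq (json_files : List (List (String × List Int))) :
    json_files.foldl (fun counts json_file =>
      (PySem.List.enumerate ((PySem.Dict.mk json_file).getD "isValid" []) 0).foldl
        (fun counts p => if p.2 == 1 then counts.modify p.1 0 (· + 1) else counts)
        counts) PySem.Dict.empty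
    = PySem.Dict.counter ((json_files.map pvVl).flatten) := by
  rw [PySem.Dict.counter_eq_foldl, List.foldl_flatten, List.foldl_map]
  apply PySem.List.foldl_congr_mem
  intro d jf _
  rw [PySem.List.foldl_if_eq_foldl_filter (fun p : Int × Int => p.2 == 1)
        (fun c (p : Int × Int) => c.modify p.1 0 (· + 1)) _ d]
  rw [pvFoldlMapFst (fun (c : PySem.Dict Int Int) x => c.modify x 0 (· + 1))]
  rfl

-- items of a counter, filtered on the count and projected back to keys
lemma pvFilterMapPair (c : Int → Int) (n : Int) (l : List Int) :
    ((l.map (fun k => (k, c k))).filter (fun q => q.2 == n)).map (·.1)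
      = l.filter (fun k => c k == n) := by
  induction l with
  | nil => rfl
  | cons a l ih => by_cases h : (c a == n) = true <;> simp [h, ih]

lemma pvCountFlatten_le (rs : List (List (String × List Int))) (x : Int) :
    ((rs.map pvVl).flatten).count x ≤ rs.length := by
  induction rs with
  | nil => simp
  | cons r rs ih =>
    rw [List.map_cons, List.flatten_cons, List.count_append]
    have h1 : (pvVl r).count x ≤ 1 := List.nodup_iff_count_le_one.mp (pvVl_nodup r) x
    have := Nat.add_le_add h1 ih
    simp only [List.length_cons]
    omega

lemma pvCountFlatten_iff (rs : List (List (String × List Int))) (x : Int) :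
    (((rs.map pvVl).flatten).count x = rs.length) ↔
      ((rs.map pvVl).all (fun t => t.contains x) = true) := by
  induction rs with
  | nil => simp
  | cons r rs ih =>
    rw [List.map_cons, List.flatten_cons, List.count_append, List.all_cons]
    have h1 : (pvVl r).count x ≤ 1 := List.nodup_iff_count_le_one.mp (pvVl_nodup r) x
    have h2 := pvCountFlatten_le rs x
    constructor
    · intro h
      have hr : (pvVl r).count x = 1 ∧ ((rs.map pvVl).flatten).count x = rs.length := by
        simp only [List.length_cons] at h; omega
      refine (Bool.and_eq_true _ _).mpr ⟨?_, ih.mp hr.2⟩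
      have : x ∈ pvVl r := by
        by_contra hx
        rw [List.count_eq_zero_of_not_mem hx] at hr
        omega
      simpa using this
    · intro h
      obtain ⟨hc, hrest⟩ := Bool.and_eq_true _ _ |>.mp h
      have hx : x ∈ pvVl r := by simpa using hc
      rw [List.count_eq_one_of_mem (pvVl_nodup r) hx, ih.mpr hrest]
      simp only [List.length_cons]
      omega

theorem generate_valid_set_spec : Claim_equal_generate_valid_set := by
  intro json_files _ hpre
  obtain ⟨hne, hkeys⟩ := hpre
  obtain ⟨f0, rest, rfl⟩ := List.exists_cons_of_ne_nil hne
  unfold Spec_generate_valid_set generate_valid_set generate_valid_set_alt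
  simp only [PySem.List.foldl_append_singleton_eq_map, pvValidSet_eq, pvCounts_eq]
  rw [show ((f0 :: rest).map (fun json_file =>
        pvVl json_file)) = pvVl f0 :: rest.map pvVl from by simp [pvVl]]
  simp only [List.nil_append, List.headD_cons]
  rw [pvLoopA, pvFoldInter]
  -- B side
  rw [PySem.Dict.items_counter, pvFilterMapPair]
  set L := ((pvVl f0 :: rest.map pvVl).flatten) with hL
  have hnodupO : (PySem.Set.ofList L).Nodup := PySem.Set.nodup_ofList L
  rw [PySem.Set.ofList_eq_self_of_nodup _ (hnodupO.filter _)]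
  -- ofList L = pvVl f0 ++ the new elements of the remaining files
  have hsplit : PySem.Set.ofList L = pvVl f0 ++
      (PySem.Set.ofList ((rest.map pvVl).flatten)).filter (fun y => !((pvVl f0 : PySem.Set Int).contains y)) := by
    rw [hL, List.flatten_cons, PySem.Set.ofList_eq_foldl, List.foldl_append,
      ← PySem.Set.ofList_eq_foldl,
      PySem.Set.ofList_eq_self_of_nodup _ (pvVl_nodup f0)]
    exact PySem.Set.update_eq_append_filter (pvVl f0) _
  rw [hsplit, List.filter_append]
  have hM : ∀ y, y ∈ (PySem.Set.ofList ((rest.map pvVl).flatten)).filter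
      (fun y => !((pvVl f0 : PySem.Set Int).contains y)) → y ∉ pvVl f0 := by
    intro y hy
    have := (List.mem_filter.mp hy).2
    simpa [PySem.Set.contains] using this
  -- the second block is filtered away: counts there stay below the number of files
  have hdrop : ((PySem.Set.ofList ((rest.map pvVl).flatten)).filter
      (fun y => !((pvVl f0 : PySem.Set Int).contains y))).filter
      (fun k => (((L.count k : Int)) == ((f0 :: rest).length : Int))) = [] := by
    rw [List.filter_eq_nil_iff]
    intro y hy
    have hnot := hM y hy
    have hc0 : (pvVl f0).count y = 0 := List.count_eq_zero_of_not_mem hnot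
    have hle := pvCountFlatten_le rest y
    have hcL : L.count y = ((rest.map pvVl).flatten).count y := by
      rw [hL, List.flatten_cons, List.count_append, hc0]; omega
    simp only [beq_iff_eq, List.length_cons]
    intro hcontra
    rw [hcL] at hcontra
    have : ((rest.map pvVl).flatten).count y = rest.length + 1 := by exact_mod_cast hcontra
    omega
  rw [hdrop, List.append_nil]
  -- pointwise on pvVl f0
  apply List.filter_congr
  intro x hx
  have hc1 : (pvVl f0).count x = 1 := List.count_eq_one_of_mem (pvVl_nodup f0) hx
  have hcL : L.count x = 1 + ((rest.map pvVl).flatten).count x := by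
    rw [hL, List.flatten_cons, List.count_append, hc1]
  have hle := pvCountFlatten_le rest x
  have hiff := pvCountFlatten_iff rest x
  have hmain : ((rest.map pvVl).all (fun t => t.contains x) = true) ↔
      ((L.count x : Int) = (((f0 :: rest).length : Nat) : Int)) := by
    rw [← hiff]
    have hcast : ((L.count x : Int) = (((f0 :: rest).length : Nat) : Int)) ↔
        L.count x = (f0 :: rest).length := by exact_mod_cast Iff.rfl
    rw [hcast]
    simp only [List.length_cons]
    omega
  rcases Bool.eq_false_or_eq_true ((rest.map pvVl).all (fun t => t.contains x)) with hall | hall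
  all_goals rw [hall]; symm
  · rw [beq_iff_eq]
    exact hmain.mp hall
  · rw [beq_eq_false_iff_ne]
    intro hcontra
    have hh := hmain.mpr hcontra
    rw [hall] at hh
    exact Bool.false_ne_true hh
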